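-- pv_equiv track=rewrite | github.com/fyzjut/DFCNet_Plus | DTW.py | find_continuous_odd_sequences
-- ===== SOURCE A (Python) =====
-- def find_continuous_odd_sequences(path):
--     odd_sequences = []
--     start_index = None
--     in_sequence = False
--     previous_value = None
--
--     for i, value in enumerate(path):
--         if value % 2 != 0:
--             if not in_sequence:
--                 start_index = i
--                 in_sequence = True
--             elif value != previous_value:
--
--                 odd_sequences.append((start_index, i - 1))
--                 start_index = i
--         else:
--             if in_sequence:
--                 odd_sequences.append((start_index, i - 1))
--                 in_sequence = False
--
--         previous_value = value
--
--
--     if in_sequence: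
--         odd_sequences.append((start_index, len(path) - 1))
--
--     return odd_sequences
-- ===== SOURCE B (Python) =====
-- def find_continuous_odd_sequences(path):
--     # Run-splitting rewrite: scan maximal runs of equal consecutive values,
--     # emit the index range of each run whose value is odd.
--     result = []
--     i, n = 0, len(path)
--     while i < n:
--         j = i + 1
--         while j < n and path[j] == path[i]:
--             j += 1
--         if path[i] % 2 != 0:
--             result.append((i, j - 1))
--         i = j
--     return result
-- ===== Notes on version B (the rewrite author's own statement) =====
-- stated objective: simpler
-- what changed: Replaced the in_sequence/previous_value state machine with a run-splitting scan: find each maximal run of equal consecutive values and emit its index range when the value is odd.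
import Mathlib
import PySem

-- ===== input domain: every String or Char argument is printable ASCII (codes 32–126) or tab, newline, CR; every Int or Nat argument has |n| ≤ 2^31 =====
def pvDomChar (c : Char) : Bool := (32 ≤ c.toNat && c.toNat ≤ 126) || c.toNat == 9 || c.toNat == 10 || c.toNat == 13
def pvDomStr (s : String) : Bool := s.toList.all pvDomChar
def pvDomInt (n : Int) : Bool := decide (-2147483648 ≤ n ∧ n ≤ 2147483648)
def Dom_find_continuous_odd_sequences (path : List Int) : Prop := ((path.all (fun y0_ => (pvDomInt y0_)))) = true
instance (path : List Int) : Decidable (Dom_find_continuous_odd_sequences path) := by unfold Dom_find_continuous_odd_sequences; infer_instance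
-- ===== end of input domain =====

-- B replaces A's in_sequence/previous_value state machine by a run-splitting scan
-- over maximal runs of equal consecutive values (objective: simpler).

-- ===== PORT A =====
-- literal port of A's loop: state (acc, start_index, in_sequence, previous_value), index i
def goA : List Int → Int → List (Int × Int) → Option Int → Bool → Option Int → List (Int × Int)
  | [], i, acc, start, inSeq, _prev =>
      if inSeq then acc ++ [(start.getD 0, i - 1)] else acc
  | v :: rest, i, acc, start, inSeq, prev =>
      if PySem.Int.mod v 2 ≠ 0 then
        if !inSeq then
          goA rest (i + 1) acc (some i) true (some v)
        else if some v ≠ prev then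
          goA rest (i + 1) (acc ++ [(start.getD 0, i - 1)]) (some i) true (some v)
        else
          goA rest (i + 1) acc start inSeq (some v)
      else
        if inSeq then
          goA rest (i + 1) (acc ++ [(start.getD 0, i - 1)]) none false (some v)
        else
          goA rest (i + 1) acc start inSeq (some v)

def find_continuous_odd_sequences (path : List Int) : List (Int × Int) :=
  goA path 0 [] none false none

-- ===== PORT B =====
-- port of Source B: each outer-while step takes one maximal run (inner while = takeWhile)
def runsGo : List Int → Int → List (Int × Int)
  | [], _ => []
  | v :: rest, i =>
      let k := (rest.takeWhile (fun x => x == v)).length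
      let tail := runsGo (rest.dropWhile (fun x => x == v)) (i + 1 + (k : Int))
      if PySem.Int.mod v 2 ≠ 0 then (i, i + (k : Int)) :: tail else tail
termination_by xs _ => xs.length
decreasing_by
  simpa using Nat.lt_succ_of_le (List.length_dropWhile_le _ _)

def find_continuous_odd_sequences_alt (path : List Int) : List (Int × Int) :=
  runsGo path 0

-- ===== PRECONDITION & SPEC =====
def Spec_find_continuous_odd_sequences (path : List Int) (out : List (Int × Int)) : Prop := out = find_continuous_odd_sequences_alt path
instance (path : List Int) (out : List (Int × Int)) : Decidable (Spec_find_continuous_odd_sequences path out) := by unfold Spec_find_continuous_odd_sequences; infer_instance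

-- ===== CLAIM (what is proved, stated in full; the proofs are below) =====
def Claim_equal_find_continuous_odd_sequences : Prop := ∀ (path : List Int), Dom_find_continuous_odd_sequences path → Spec_find_continuous_odd_sequences path (find_continuous_odd_sequences path)

-- ===== LEMMAS AND PROOFS =====

-- consuming a block of values equal to the current odd run value leaves A's state unchanged
theorem goA_replicate (k : Nat) (v : Int) (xs : List Int) (i : Int) (acc : List (Int × Int))
    (s : Int) (hv : PySem.Int.mod v 2 ≠ 0) :
    goA (List.replicate k v ++ xs) i acc (some s) true (some v)
      = goA xs (i + k) acc (some s) true (some v) := by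
  induction k generalizing i with
  | zero => simp
  | succ k ih =>
      simp only [List.replicate_succ, List.cons_append, goA, if_pos hv]
      simp only [Bool.not_true, ne_eq, not_true_eq_false, Bool.false_eq_true, if_false]
      rw [ih (i + 1)]
      congr 1
      push_cast; ring

theorem takeWhile_eq_replicate (v : Int) (l : List Int) :
    l.takeWhile (fun x => x == v) = List.replicate (l.takeWhile (fun x => x == v)).length v := by
  induction l with
  | nil => simp
  | cons a t ih =>
      by_cases h : a = v
      · subst h
        simpa [List.takeWhile_cons, List.replicate_succ] using ih
      · simp [h]

theorem dropWhile_head_ne (v : Int) (l : List Int) (w : Int) (r : List Int)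
    (h : l.dropWhile (fun x => x == v) = w :: r) : w ≠ v := by
  intro hw
  have := List.head?_dropWhile_not (fun x => x == v) l
  rw [h] at this
  simp [hw] at this

-- one-step unfolding of runsGo on a cons cell
theorem runsGo_cons (v : Int) (rest : List Int) (i : Int) :
    runsGo (v :: rest) i =
      if PySem.Int.mod v 2 ≠ 0 then
        (i, i + ((rest.takeWhile (fun x => x == v)).length : Int)) ::
          runsGo (rest.dropWhile (fun x => x == v)) (i + 1 + ((rest.takeWhile (fun x => x == v)).length : Int))
      else runsGo (rest.dropWhile (fun x => x == v)) (i + 1 + ((rest.takeWhile (fun x => x == v)).length : Int)) := by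
  rw [runsGo]

-- runs of an even value contribute nothing: peel one even element
theorem runsGo_even_cons (w : Int) (t : List Int) (j : Int)
    (hw : ¬ PySem.Int.mod w 2 ≠ 0) :
    runsGo (w :: t) j = runsGo t (j + 1) := by
  rw [runsGo_cons, if_neg hw]
  cases t with
  | nil => simp
  | cons u t' =>
      by_cases h : u = w
      · subst h
        rw [runsGo_cons, if_neg hw]
        simp only [List.takeWhile_cons, beq_self_eq_true, if_true, List.dropWhile_cons,
          List.length_cons]
        congr 1
        push_cast; ring
      · simp only [List.takeWhile_cons, List.dropWhile_cons, beq_iff_eq, h, if_false,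
          List.length_nil]
        congr 1
        push_cast; ring

-- the combined state-machine/runs invariant, by strong induction on the list length
theorem goA_main (n : Nat) : ∀ (xs : List Int), xs.length ≤ n →
    (∀ (i : Int) (acc : List (Int × Int)) (st : Option Int) (prev : Option Int),
        goA xs i acc st false prev = acc ++ runsGo xs i) ∧
    (∀ (i : Int) (acc : List (Int × Int)) (s v : Int), PySem.Int.mod v 2 ≠ 0 →
        goA xs i acc (some s) true (some v)
          = acc ++ (s, i + ((xs.takeWhile (fun x => x == v)).length : Int) - 1)
              :: runsGo (xs.dropWhile (fun x => x == v))
                  (i + ((xs.takeWhile (fun x => x == v)).length : Int))) := by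
  induction n with
  | zero =>
      intro xs hxs
      have : xs = [] := List.length_eq_zero_iff.mp (Nat.le_zero.mp hxs)
      subst this
      constructor
      · intro i acc st prev; simp [goA, runsGo]
      · intro i acc s v hv; simp [goA, runsGo]
  | succ n ih =>
      intro xs hxs
      constructor
      · -- P : not in a sequence
        intro i acc st prev
        cases xs with
        | nil => simp [goA, runsGo]
        | cons v t =>
            have ht : t.length ≤ n := by simpa using Nat.lt_succ_iff.mp (by simpa using hxs)
            by_cases hv : PySem.Int.mod v 2 ≠ 0
            · -- odd: start a sequence, use Q on t
              simp only [goA, if_pos hv, Bool.not_false, if_pos]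
              rw [((ih t ht).2) (i + 1) acc i v hv, runsGo_cons, if_pos hv]
              have h1 : i + 1 + ((t.takeWhile (fun x => x == v)).length : Int) - 1
                  = i + ((t.takeWhile (fun x => x == v)).length : Int) := by ring
              rw [h1]
            · -- even: stay out, use P on t
              simp only [goA, if_neg hv, Bool.false_eq_true, if_false]
              rw [((ih t ht).1) (i + 1) acc st (some v)]
              rw [runsGo_even_cons v t i hv]
      · -- Q : inside a sequence of odd value v with start s
        intro i acc s v hv
        have hdec : xs = List.replicate ((xs.takeWhile (fun x => x == v)).length) v
            ++ xs.dropWhile (fun x => x == v) := by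
          conv_lhs => rw [← List.takeWhile_append_dropWhile (p := fun x => x == v) (l := xs)]
          rw [← takeWhile_eq_replicate]
        set k := (xs.takeWhile (fun x => x == v)).length with hk
        conv_lhs => rw [hdec]
        rw [goA_replicate k v _ i acc s hv]
        cases hd : xs.dropWhile (fun x => x == v) with
        | nil => simp [goA, runsGo]
        | cons w r =>
            have hwv : w ≠ v := dropWhile_head_ne v xs w r hd
            have hlen : r.length ≤ n := by
              have h1 : (w :: r).length ≤ xs.length := hd ▸ List.length_dropWhile_le _ _
              have := le_trans h1 hxs
              simp at this; omega
            by_cases hw : PySem.Int.mod w 2 ≠ 0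
            · -- next run is odd and different: A emits and restarts
              have hne : some w ≠ some v := by simpa using hwv
              simp only [goA, if_pos hw, Bool.not_true, Bool.false_eq_true, if_false,
                if_pos hne, Option.getD_some]
              rw [((ih r hlen).2) (i + (k : Int) + 1) _ (i + (k : Int)) w hw]
              rw [runsGo_cons, if_pos hw]
              simp only [List.append_assoc, List.singleton_append]
              have h1 : i + (k : Int) + 1 + ((r.takeWhile (fun x => x == w)).length : Int) - 1
                  = i + (k : Int) + ((r.takeWhile (fun x => x == w)).length : Int) := by ring
              rw [h1]
            · -- next element even: A emits and leaves the sequence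
              simp only [goA, if_neg hw, if_pos, Option.getD_some]
              rw [((ih r hlen).1) (i + (k : Int) + 1) _ none (some w)]
              rw [runsGo_even_cons w r (i + (k : Int)) hw]
              simp [List.append_assoc]

-- ===== VERDICT (by name: the statement is the Claim_ definition above) =====
theorem find_continuous_odd_sequences_spec : Claim_equal_find_continuous_odd_sequences := by
  intro path _
  unfold Spec_find_continuous_odd_sequences find_continuous_odd_sequences find_continuous_odd_sequences_alt
  simpa using ((goA_main path.length path le_rfl).1) 0 [] none none
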